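-- pv_equiv track=rewrite | github.com/smartagent01/smartagent | smartagent/src/repair_agent.py | clean_error_string
-- ===== SOURCE A (Python) =====
-- def clean_error_string(error_string):
--     lines = error_string.split("\n")
--     cleaned_lines = []
--     start_error = False
--     for line in lines:
--         if "solcx.exceptions.SolcError:" not in line:
--             start_error = True
--         if start_error:
--             cleaned_lines.append(line)
--     if len(cleaned_lines) == 0:
--         return error_string
--     return "\n".join(cleaned_lines)
-- ===== SOURCE B (Python) =====
-- def clean_error_string(error_string):
--     lines = error_string.split("\n")
--     for i, line in enumerate(lines):
--         if "solcx.exceptions.SolcError:" not in line: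
--             return "\n".join(lines[i:])
--     return error_string
-- ===== Notes on version B (the rewrite author's own statement) =====
-- stated objective: simpler
-- what changed: Replaces the accumulator list plus latch flag with a locate-then-slice: find the first line not containing the marker and join the suffix from there, returning the original string if none exists.
import Mathlib
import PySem

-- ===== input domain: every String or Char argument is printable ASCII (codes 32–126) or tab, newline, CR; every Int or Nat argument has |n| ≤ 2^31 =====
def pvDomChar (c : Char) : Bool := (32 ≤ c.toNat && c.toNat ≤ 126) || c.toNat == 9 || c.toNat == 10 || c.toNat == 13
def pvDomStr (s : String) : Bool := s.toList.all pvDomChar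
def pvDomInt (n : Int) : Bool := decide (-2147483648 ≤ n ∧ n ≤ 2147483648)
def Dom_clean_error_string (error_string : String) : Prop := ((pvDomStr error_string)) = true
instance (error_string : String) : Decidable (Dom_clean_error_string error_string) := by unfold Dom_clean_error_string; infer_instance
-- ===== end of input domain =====

-- B replaces A's accumulator list plus latch flag with locate-then-slice; objective: simpler.

-- ===== PORT A =====
-- fold state: (cleaned_lines, start_error)
def pvStepA (st : List String × Bool) (line : String) : List String × Bool :=
  let start := if ¬ PySem.Str.isIn "solcx.exceptions.SolcError:" line then true else st.2
  (if start then st.1 ++ [line] else st.1, start)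

def clean_error_string (error_string : String) : String :=
  let lines := (PySem.Str.split? error_string "\n").getD []
  let cleaned := (lines.foldl pvStepA ([], false)).1
  if cleaned.length = 0 then error_string else PySem.Str.join "\n" cleaned

-- ===== PORT B =====
-- scan for the first line without the marker; join the suffix from there
def pvGoB : List String → String → String
  | [], orig => orig
  | l :: rest, orig =>
    if ¬ PySem.Str.isIn "solcx.exceptions.SolcError:" l then
      PySem.Str.join "\n" (l :: rest)
    else pvGoB rest orig

def clean_error_string_alt (error_string : String) : String :=
  pvGoB ((PySem.Str.split? error_string "\n").getD []) error_string

-- ===== PRECONDITION & SPEC =====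
def Spec_clean_error_string (error_string : String) (out : String) : Prop := out = clean_error_string_alt error_string
instance (error_string : String) (out : String) : Decidable (Spec_clean_error_string error_string out) := by unfold Spec_clean_error_string; infer_instance

-- ===== CLAIM (what is proved, stated in full; the proofs are below) =====
def Claim_equal_clean_error_string : Prop := ∀ (error_string : String), Dom_clean_error_string error_string → Spec_clean_error_string error_string (clean_error_string error_string)

-- ===== LEMMAS AND PROOFS =====

-- once the latch is true, every remaining line is appended
theorem foldA_true (lines : List String) (acc : List String) :
    lines.foldl pvStepA (acc, true) = (acc ++ lines, true) := by
  induction lines generalizing acc with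
  | nil => simp
  | cons l rest ih =>
    have hst : pvStepA (acc, true) l = (acc ++ [l], true) := by
      unfold pvStepA
      by_cases h : PySem.Str.isIn "solcx.exceptions.SolcError:" l = true <;> simp [h]
    rw [List.foldl_cons, hst, ih]
    simp

theorem pvGoB_cons (l : String) (rest : List String) (orig : String) :
    pvGoB (l :: rest) orig =
      if PySem.Str.isIn "solcx.exceptions.SolcError:" l = true then pvGoB rest orig
      else PySem.Str.join "\n" (l :: rest) := by
  rw [pvGoB]
  by_cases h : PySem.Str.isIn "solcx.exceptions.SolcError:" l = true
  · rw [if_neg (fun hc => hc h), if_pos h]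
  · rw [if_pos h, if_neg h]


theorem foldA_eq_goB (lines : List String) (orig : String) :
    (if ((lines.foldl pvStepA ([], false)).1).length = 0 then orig
     else PySem.Str.join "\n" (lines.foldl pvStepA ([], false)).1) = pvGoB lines orig := by
  induction lines with
  | nil => simp [pvGoB]
  | cons l rest ih =>
    by_cases h : PySem.Str.isIn "solcx.exceptions.SolcError:" l = true
    · rw [List.foldl_cons,
        show pvStepA ([], false) l = ([], false) by unfold pvStepA; rw [if_neg (fun hc => hc h)]; rfl,
        ih, pvGoB_cons, if_pos h]
    · rw [List.foldl_cons,
        show pvStepA ([], false) l = ([l], true) by unfold pvStepA; rw [if_pos h]; rfl,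
        foldA_true, pvGoB_cons, if_neg h]
      simp

-- ===== VERDICT (by name: the statement is the Claim_ definition above) =====
theorem clean_error_string_spec : Claim_equal_clean_error_string := by
  intro s _
  unfold Spec_clean_error_string clean_error_string clean_error_string_alt
  exact foldA_eq_goB _ s
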